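-- pv_equiv track=rewrite | github.com/Elizabeth-Martin2/leet-code | algorithms/greedy/fish_bait.py | fishBait
-- ===== SOURCE A (Python) =====
-- from collections import defaultdict
--
-- def fishBait(fishes: list[int], baits: list[int]) -> int:
--     fish_count = 0
--
--     fishes.sort()
--     baits.sort()
--
--     bait_count = defaultdict(int)
--     f_ptr, b_ptr = 0, 0
--
--     while f_ptr < len(fishes) and b_ptr < len(baits):
--         if fishes[f_ptr] <= baits[b_ptr] or bait_count[b_ptr] >= 3:
--             b_ptr += 1
--         else:
--             fish_count += 1
--             f_ptr += 1
--             bait_count[b_ptr] += 1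
--
--     return fish_count
-- ===== SOURCE B (Python) =====
-- def fishBait(fishes: list[int], baits: list[int]) -> int:
--     # Sorts both arguments in place (same mutation as the original).
--     fishes.sort()
--     baits.sort()
--     n = len(fishes)
--     i = 0  # number of fishes matched so far = index of first unmatched fish
--     for b in baits:
--         # lists are sorted: if the first unmatched fish beats b, so do all later
--         # ones, so b is filled to capacity in one arithmetic step.
--         if i < n and fishes[i] > b:
--             i = min(i + 3, n)
--     return i
-- ===== Notes on version B (the rewrite author's own statement) =====
-- stated objective: alternative
-- what changed: Replaces A's two-pointer walk with a per-bait-index capacity counter by a single fold over the sorted baits that never iterates the fish side: since both lists are sorted, each bait either matches nothing or is filled to capacity in one arithmetic step i = min(i+3, n) after a single head comparison.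
import Mathlib
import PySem

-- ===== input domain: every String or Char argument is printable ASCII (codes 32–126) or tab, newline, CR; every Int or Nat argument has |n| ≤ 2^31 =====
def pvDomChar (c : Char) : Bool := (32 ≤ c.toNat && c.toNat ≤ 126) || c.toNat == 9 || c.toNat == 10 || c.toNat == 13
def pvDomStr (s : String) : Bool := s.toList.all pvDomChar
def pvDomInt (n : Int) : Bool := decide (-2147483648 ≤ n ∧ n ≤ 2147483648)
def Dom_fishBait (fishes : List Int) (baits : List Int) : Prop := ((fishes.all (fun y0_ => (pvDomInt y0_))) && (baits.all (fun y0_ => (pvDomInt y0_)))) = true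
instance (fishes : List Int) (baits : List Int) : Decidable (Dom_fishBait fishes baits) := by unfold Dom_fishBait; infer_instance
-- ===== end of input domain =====

-- B replaces A's two-pointer walk with a per-bait-index counter by a single fold over the sorted
-- baits: each bait is filled to capacity in one arithmetic step (i = min (i+3) n) after a single
-- head comparison, and the fish side is never iterated. Both sort their list arguments in place;
-- the theorems are about the return value.

-- ===== PORT A =====
-- the while loop: f_ptr/b_ptr pointers, defaultdict(int) bait_count (read = getD _ 0, write = insert)
def fishBaitLoop (fishes baits : List Int) (fPtr bPtr : Nat)
    (baitCount : PySem.Dict Int Int) (fishCount : Int) : Int :=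
  if h : fPtr < fishes.length ∧ bPtr < baits.length then
    if fishes[fPtr]'h.1 ≤ baits[bPtr]'h.2 ∨ 3 ≤ baitCount.getD (bPtr : Int) 0 then
      fishBaitLoop fishes baits fPtr (bPtr + 1) baitCount fishCount
    else
      fishBaitLoop fishes baits (fPtr + 1) bPtr
        (baitCount.insert (bPtr : Int) (baitCount.getD (bPtr : Int) 0 + 1)) (fishCount + 1)
  else fishCount
termination_by (fishes.length - fPtr) + (baits.length - bPtr)
decreasing_by · omega
              · omega

def fishBait (fishes : List Int) (baits : List Int) : Int :=
  fishBaitLoop (PySem.List.sorted fishes (fun x => x)) (PySem.List.sorted baits (fun x => x))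
    0 0 PySem.Dict.empty 0

-- ===== PORT B =====
-- the for-loop of Source B over baits, state i (the 'i < n and fishes[i] > b' test is the dependent
-- if guarding the index; n = fishes.length)
def fishBaitAltLoop (fishes : List Int) (n : Nat) : List Int → Nat → Nat
  | [], i => i
  | b :: bs, i =>
      fishBaitAltLoop fishes n bs
        (if h : i < fishes.length then (if b < fishes[i] then min (i + 3) n else i) else i)

def fishBait_alt (fishes : List Int) (baits : List Int) : Int :=
  let fs := PySem.List.sorted fishes (fun x => x)
  (fishBaitAltLoop fs fs.length (PySem.List.sorted baits (fun x => x)) 0 : Int)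

-- ===== PRECONDITION & SPEC =====
def Spec_fishBait (fishes : List Int) (baits : List Int) (out : Int) : Prop := out = fishBait_alt fishes baits
instance (fishes : List Int) (baits : List Int) (out : Int) : Decidable (Spec_fishBait fishes baits out) := by unfold Spec_fishBait; infer_instance

-- ===== CLAIM (what is proved, stated in full; the proofs are below) =====
def Claim_equal_fishBait : Prop := ∀ (fishes : List Int) (baits : List Int), Dom_fishBait fishes baits → Spec_fishBait fishes baits (fishBait fishes baits)

-- ===== LEMMAS AND PROOFS =====

-- suffix-level view of A's loop: third argument = remaining capacity of the head bait
def capGreedy : List Int → List Int → Nat → Int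
  | [], _, _ => 0
  | _ :: _, [], _ => 0
  | f :: fs, b :: bs, c =>
      if f ≤ b ∨ c = 0 then capGreedy (f :: fs) bs 3
      else 1 + capGreedy fs (b :: bs) (c - 1)
termination_by l r _ => l.length + r.length

lemma capGreedy_nil_right : ∀ (l : List Int) (c : Nat), capGreedy l [] c = 0 := by
  intro l c; cases l <;> simp [capGreedy]

-- if every remaining fish beats b, bait b is filled to capacity in one batch
lemma capGreedy_batch (b : Int) : ∀ (c : Nat) (fs bs : List Int), (∀ x ∈ fs, b < x) →
    capGreedy fs (b :: bs) c
      = ((min c fs.length : Nat) : Int) + capGreedy (fs.drop (min c fs.length)) bs 3 := by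
  intro c
  induction c with
  | zero =>
      intro fs bs _
      cases fs with
      | nil => simp [capGreedy]
      | cons f fs' => simp [capGreedy]
  | succ c' ih =>
      intro fs bs hall
      cases fs with
      | nil => simp [capGreedy]
      | cons f fs' =>
          have hbf : b < f := hall f (by simp)
          rw [capGreedy, if_neg (by omega)]
          rw [show c' + 1 - 1 = c' from rfl,
            ih fs' bs (fun x hx => hall x (by simp [hx]))]
          have hmin : min (c' + 1) (f :: fs').length = min c' fs'.length + 1 := by
            simp [List.length_cons]
          rw [hmin, List.drop_succ_cons]
          push_cast
          ring

-- A's loop suffix view = B's loop, given the fish list is sorted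
lemma alt_eq_capGreedy (fs : List Int) (hs : fs.Pairwise (· ≤ ·)) :
    ∀ (bs : List Int) (i : Nat), i ≤ fs.length →
      (fishBaitAltLoop fs fs.length bs i : Int) = i + capGreedy (fs.drop i) bs 3 := by
  intro bs
  induction bs with
  | nil => intro i _; simp [fishBaitAltLoop, capGreedy_nil_right]
  | cons b bs ih =>
      intro i hi
      by_cases hlt : i < fs.length
      · have hdrop := List.drop_eq_getElem_cons hlt
        have hpair : (fs.drop i).Pairwise (· ≤ ·) := hs.drop
        by_cases hb : b < fs[i]
        · -- batch step
          have hall : ∀ x ∈ fs.drop i, b < x := by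
            rw [hdrop] at hpair ⊢
            intro x hx
            rcases List.mem_cons.mp hx with rfl | hx'
            · exact hb
            · exact lt_of_lt_of_le hb ((List.pairwise_cons.mp hpair).1 x hx')
          rw [fishBaitAltLoop, dif_pos hlt, if_pos hb,
            ih (min (i + 3) fs.length) (by omega),
            capGreedy_batch b 3 (fs.drop i) bs hall, List.drop_drop]
          have hlen : (fs.drop i).length = fs.length - i := List.length_drop ..
          have h1 : i + min 3 (fs.drop i).length = min (i + 3) fs.length := by omega
          rw [h1]; omega
        · -- bait too big for the first unmatched fish: nothing matches
          rw [fishBaitAltLoop, dif_pos hlt, if_neg hb, ih i hi, hdrop, capGreedy,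
            if_pos (Or.inl (le_of_not_gt hb)), ← hdrop]
      · -- all fishes matched: i = length, fish suffix empty
        have : ¬ i < fs.length := hlt
        rw [fishBaitAltLoop, dif_neg this, ih i hi,
          List.drop_eq_nil_of_le (by omega)]
        simp [capGreedy]

-- A's pointer loop = the suffix view (from the previous development)
lemma loopA_eq : ∀ (fs bs : List Int) (f b : Nat) (d : PySem.Dict Int Int) (acc : Int),
    (∀ k : Int, (b : Int) < k → d.getD k 0 = 0) →
    0 ≤ d.getD (b : Int) 0 → d.getD (b : Int) 0 ≤ 3 →
    fishBaitLoop fs bs f b d acc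
      = acc + capGreedy (fs.drop f) (bs.drop b) (3 - (d.getD (b : Int) 0).toNat) := by
  intro fs bs f b d acc
  fun_induction fishBaitLoop fs bs f b d acc with
  | case1 f b d acc h hcond ih =>
      intro hinv h0 h3
      have hb1 : d.getD ((b : Int) + 1) 0 = 0 := hinv _ (by omega)
      have hinv' : ∀ k : Int, ((b + 1 : Nat) : Int) < k → d.getD k 0 = 0 := by
        intro k hk; exact hinv k (by push_cast at hk ⊢; omega)
      rw [ih hinv' (by push_cast; omega) (by push_cast; omega)]
      rw [List.drop_eq_getElem_cons h.1, List.drop_eq_getElem_cons h.2, capGreedy]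
      have hc : fs[f] ≤ bs[b] ∨ 3 - (d.getD (b : Int) 0).toNat = 0 := by
        rcases hcond with hle | hge
        · exact Or.inl hle
        · right; omega
      rw [if_pos hc, ← List.drop_eq_getElem_cons h.1]
      have : d.getD (((b + 1 : Nat) : Int)) 0 = 0 := by push_cast; exact hb1
      rw [this]; norm_num
  | case2 f b d acc h hcond ih =>
      intro hinv h0 h3
      push_neg at hcond
      obtain ⟨hbf, hlt3⟩ := hcond
      set v := d.getD (b : Int) 0 with hv
      have hget : (d.insert (b : Int) (v + 1)).getD (b : Int) 0 = v + 1 := by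
        rw [PySem.Dict.getD_insert]; simp
      have hinv' : ∀ k : Int, (b : Int) < k → (d.insert (b : Int) (v + 1)).getD k 0 = 0 := by
        intro k hk
        rw [PySem.Dict.getD_insert, if_neg (by omega)]
        exact hinv k hk
      rw [ih hinv' (by rw [hget]; omega) (by rw [hget]; omega), hget]
      rw [List.drop_eq_getElem_cons h.1, List.drop_eq_getElem_cons h.2, capGreedy]
      have hc : ¬ (fs[f] ≤ bs[b] ∨ 3 - v.toNat = 0) := by push_neg; exact ⟨hbf, by omega⟩
      rw [if_neg hc, ← List.drop_eq_getElem_cons h.2]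
      have : 3 - (v + 1).toNat = 3 - v.toNat - 1 := by omega
      rw [this]; ring
  | case3 f b d acc h =>
      intro _ _ _
      push_neg at h
      by_cases hf : f < fs.length
      · rw [List.drop_eq_nil_of_le (h hf), capGreedy_nil_right]; ring
      · rw [List.drop_eq_nil_of_le (by omega), capGreedy]; ring

-- ===== VERDICT (by name: the statement is the Claim_ definition above) =====
theorem fishBait_spec : Claim_equal_fishBait := by
  intro fishes baits _
  unfold Spec_fishBait fishBait fishBait_alt
  have hs : (PySem.List.sorted fishes (fun x => x)).Pairwise (· ≤ ·) :=
    PySem.List.sorted_pairwise fishes (fun x => x)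
  rw [loopA_eq _ _ 0 0 _ 0 (by intro k _; simp) (by simp) (by simp),
    alt_eq_capGreedy _ hs _ 0 (by omega)]
  simp [PySem.Dict.getD_empty]
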